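-- pv_equiv track=rewrite | github.com/0-ashwin-nair-0/sic_hackathon_nova | backend/ai_engine/aqi_module.py | _get_overall_trend
-- ===== SOURCE A (Python) =====
-- def _get_overall_trend(status):
--     """Get overall trend across all zones"""
--     improving = len([s for s in status if s['trend'] == 'improving'])
--     worsening = len([s for s in status if s['trend'] == 'worsening'])
--
--     if worsening > improving:
--         return 'worsening'
--     elif improving > worsening:
--         return 'improving'
--     else:
--         return 'stable'
-- ===== SOURCE B (Python) =====
-- def _get_overall_trend(status):
--     """Get overall trend across all zones"""
--     net = 0
--     for s in status:
--         t = s['trend']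
--         if t == 'improving':
--             net += 1
--         elif t == 'worsening':
--             net -= 1
--     return 'worsening' if net < 0 else 'improving' if net > 0 else 'stable'
-- ===== Notes on version B (the rewrite author's own statement) =====
-- stated objective: simpler
-- what changed: Replaces A's two list-comprehension counting passes and count comparison by one loop maintaining a single signed tally (improving minus worsening) whose sign decides the label.
import Mathlib
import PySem

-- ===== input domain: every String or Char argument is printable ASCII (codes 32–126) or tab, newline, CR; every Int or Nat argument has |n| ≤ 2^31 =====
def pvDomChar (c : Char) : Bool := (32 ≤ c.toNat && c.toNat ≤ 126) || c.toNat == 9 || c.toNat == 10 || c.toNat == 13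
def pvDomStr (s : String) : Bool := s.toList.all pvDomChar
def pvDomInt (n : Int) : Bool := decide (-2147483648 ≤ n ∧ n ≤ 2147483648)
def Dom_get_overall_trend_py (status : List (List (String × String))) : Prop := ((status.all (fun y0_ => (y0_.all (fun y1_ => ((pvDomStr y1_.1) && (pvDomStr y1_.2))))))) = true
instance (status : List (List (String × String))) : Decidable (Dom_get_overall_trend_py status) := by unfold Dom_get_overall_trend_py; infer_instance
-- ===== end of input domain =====

-- B replaces A's two counting passes by one signed-tally loop; return-value equivalence proved on inputs where every zone dict has a 'trend' key (A raises KeyError otherwise).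


-- ===== PORT A =====
-- s['trend'] under Pre_ (key present) is the dict's first/only binding; ported via PySem.Dict.get?.
def get_overall_trend_py (status : List (List (String × String))) : String :=
  let improving : Int := ((status.filter (fun s => (PySem.Dict.mk s).get? "trend" == some "improving")).length : Int)
  let worsening : Int := ((status.filter (fun s => (PySem.Dict.mk s).get? "trend" == some "worsening")).length : Int)
  if worsening > improving then "worsening"
  else if improving > worsening then "improving"
  else "stable"

-- ===== PORT B =====
-- t = s['trend'] ported as getD with a default never used under Pre_ (key present).
def get_overall_trend_py_alt (status : List (List (String × String))) : String :=
  let net : Int := status.foldl (fun n s =>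
    let t := (PySem.Dict.mk s).getD "trend" ""
    if t == "improving" then n + 1
    else if t == "worsening" then n - 1
    else n) 0
  if net < 0 then "worsening" else if net > 0 then "improving" else "stable"

-- ===== PRECONDITION & SPEC =====
-- Pre_ excludes exactly the inputs where some zone dict lacks a 'trend' key: there Python A raises KeyError.
def Pre_get_overall_trend_py (status : List (List (String × String))) : Prop :=
  (status.all (fun s => s.any (fun p => p.1 == "trend"))) = true
instance (status : List (List (String × String))) : Decidable (Pre_get_overall_trend_py status) := by unfold Pre_get_overall_trend_py; infer_instance
def pvWitness_get_overall_trend_py : (List (List (String × String))) := [[("trend", "improving")], [("trend", "stable")]]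
def Spec_get_overall_trend_py (status : List (List (String × String))) (out : String) : Prop := out = get_overall_trend_py_alt status
instance (status : List (List (String × String))) (out : String) : Decidable (Spec_get_overall_trend_py status out) := by unfold Spec_get_overall_trend_py; infer_instance

-- ===== CLAIM (what is proved, stated in full; the proofs are below) =====
def Claim_equal_get_overall_trend_py : Prop := ∀ (status : List (List (String × String))), Dom_get_overall_trend_py status → Pre_get_overall_trend_py status → Spec_get_overall_trend_py status (get_overall_trend_py status)

-- ===== LEMMAS AND PROOFS =====

-- The single-pass tally equals the difference of A's two filter counts.
theorem pv_net_eq (status : List (List (String × String))) (n : Int) :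
    status.foldl (fun n s =>
      let t := (PySem.Dict.mk s).getD "trend" ""
      if t == "improving" then n + 1
      else if t == "worsening" then n - 1
      else n) n
    = n + ((status.filter (fun s => (PySem.Dict.mk s).get? "trend" == some "improving")).length : Int)
        - ((status.filter (fun s => (PySem.Dict.mk s).get? "trend" == some "worsening")).length : Int) := by
  induction status generalizing n with
  | nil => simp
  | cons s rest ih =>
    rw [List.foldl_cons, ih]
    simp only [List.filter_cons, PySem.Dict.getD]
    by_cases hi : (PySem.Dict.mk s).get? "trend" = some "improving"
    · simp [hi]; omega
    · by_cases hw : (PySem.Dict.mk s).get? "trend" = some "worsening"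
      · simp [hw]; omega
      · have h1 : (((PySem.Dict.mk s).get? "trend").getD "" == "improving") = false := by
          cases hg : (PySem.Dict.mk s).get? "trend" with
          | none => simp
          | some t => simp only [Option.getD_some]; simp [hg] at hi; simp [hi]
        have h2 : (((PySem.Dict.mk s).get? "trend").getD "" == "worsening") = false := by
          cases hg : (PySem.Dict.mk s).get? "trend" with
          | none => simp
          | some t => simp only [Option.getD_some]; simp [hg] at hw; simp [hw]
        simp [hi, hw, h1, h2]

-- ===== VERDICT (by name: the statement is the Claim_ definition above) =====
theorem get_overall_trend_py_spec : Claim_equal_get_overall_trend_py := by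
  intro status _ _
  unfold Spec_get_overall_trend_py get_overall_trend_py get_overall_trend_py_alt
  rw [pv_net_eq]
  dsimp only
  split_ifs <;> first | rfl | omega
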